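-- pv_equiv track=rewrite | github.com/lucmuss/nanobot-webgui | nanobot/gui/repair_worker.py | supported_repair_recipes
-- ===== SOURCE A (Python) =====
-- def supported_repair_recipes(missing_runtimes: list[str]) -> list[str]:
--     """Return the deterministic repair recipes that can fix the missing runtimes."""
--     ordered: list[str] = []
--     normalized = [str(item).strip().lower() for item in missing_runtimes if str(item).strip()]
--     if any(item in {"node", "npm", "npx"} for item in normalized):
--         ordered.append("install_node")
--     if any(item in {"uv", "uvx"} for item in normalized):
--         ordered.append("install_uv")
--     if any(item in {"python", "pip"} for item in normalized):
--         ordered.append("install_python_build_tools")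
--     if any(item == "docker" for item in normalized):
--         ordered.append("install_docker_cli")
--     return ordered
-- ===== SOURCE B (Python) =====
-- def supported_repair_recipes(missing_runtimes: list[str]) -> list[str]:
--     """Return the deterministic repair recipes that can fix the missing runtimes."""
--     node = uv = py = docker = False
--     for item in missing_runtimes:
--         s = str(item).strip().lower()
--         if s in ("node", "npm", "npx"):
--             node = True
--         elif s in ("uv", "uvx"):
--             uv = True
--         elif s in ("python", "pip"):
--             py = True
--         elif s == "docker":
--             docker = True
--     ordered: list[str] = []
--     if node:
--         ordered.append("install_node")
--     if uv:
--         ordered.append("install_uv")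
--     if py:
--         ordered.append("install_python_build_tools")
--     if docker:
--         ordered.append("install_docker_cli")
--     return ordered
-- ===== Notes on version B (the rewrite author's own statement) =====
-- stated objective: alternative
-- what changed: Replaces the intermediate normalized list plus four separate any() scans with a single classification pass over the items maintaining four booleans, followed by a fixed emit phase.
import Mathlib
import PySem

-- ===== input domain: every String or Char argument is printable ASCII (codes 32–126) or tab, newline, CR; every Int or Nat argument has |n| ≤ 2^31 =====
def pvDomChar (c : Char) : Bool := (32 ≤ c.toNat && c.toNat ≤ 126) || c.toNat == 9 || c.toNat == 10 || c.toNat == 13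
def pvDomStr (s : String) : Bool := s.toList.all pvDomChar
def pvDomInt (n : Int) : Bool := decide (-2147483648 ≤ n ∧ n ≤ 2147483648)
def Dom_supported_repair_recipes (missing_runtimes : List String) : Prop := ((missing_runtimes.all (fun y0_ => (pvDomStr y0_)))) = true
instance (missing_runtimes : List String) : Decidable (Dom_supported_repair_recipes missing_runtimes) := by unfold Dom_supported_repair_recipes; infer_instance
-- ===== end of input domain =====

-- B replaces the normalized intermediate list and four any() scans by one classification
-- pass keeping four booleans, then a fixed emit phase (alternative decomposition, same cost).


-- ===== PORT A =====
def supported_repair_recipes (missing_runtimes : List String) : List String :=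
  let ordered : List String := []
  let normalized :=
    (missing_runtimes.filter (fun item => !(PySem.Str.strip item == ""))).map
      (fun item => PySem.Str.lower (PySem.Str.strip item))
  let ordered := if normalized.any (fun i => i == "node" || i == "npm" || i == "npx")
                 then ordered ++ ["install_node"] else ordered
  let ordered := if normalized.any (fun i => i == "uv" || i == "uvx")
                 then ordered ++ ["install_uv"] else ordered
  let ordered := if normalized.any (fun i => i == "python" || i == "pip")
                 then ordered ++ ["install_python_build_tools"] else ordered
  let ordered := if normalized.any (fun i => i == "docker")
                 then ordered ++ ["install_docker_cli"] else ordered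
  ordered

-- ===== PORT B =====
def pvStepB (st : Bool × Bool × Bool × Bool) (item : String) : Bool × Bool × Bool × Bool :=
  let s := PySem.Str.lower (PySem.Str.strip item)
  if s == "node" || s == "npm" || s == "npx" then (true, st.2)
  else if s == "uv" || s == "uvx" then (st.1, true, st.2.2)
  else if s == "python" || s == "pip" then (st.1, st.2.1, true, st.2.2.2)
  else if s == "docker" then (st.1, st.2.1, st.2.2.1, true)
  else st

def supported_repair_recipes_alt (missing_runtimes : List String) : List String :=
  let st := missing_runtimes.foldl pvStepB (false, false, false, false)
  (if st.1 then ["install_node"] else []) ++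
  (if st.2.1 then ["install_uv"] else []) ++
  (if st.2.2.1 then ["install_python_build_tools"] else []) ++
  (if st.2.2.2 then ["install_docker_cli"] else [])

-- ===== PRECONDITION & SPEC =====
def Spec_supported_repair_recipes (missing_runtimes : List String) (out : List String) : Prop := out = supported_repair_recipes_alt missing_runtimes
instance (missing_runtimes : List String) (out : List String) : Decidable (Spec_supported_repair_recipes missing_runtimes out) := by unfold Spec_supported_repair_recipes; infer_instance

-- ===== CLAIM (what is proved, stated in full; the proofs are below) =====
def Claim_equal_supported_repair_recipes : Prop := ∀ (missing_runtimes : List String), Dom_supported_repair_recipes missing_runtimes → Spec_supported_repair_recipes missing_runtimes (supported_repair_recipes missing_runtimes)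

-- ===== LEMMAS AND PROOFS =====

def pvN (item : String) : Bool :=
  let s := PySem.Str.lower (PySem.Str.strip item)
  s == "node" || s == "npm" || s == "npx"
def pvU (item : String) : Bool :=
  let s := PySem.Str.lower (PySem.Str.strip item)
  s == "uv" || s == "uvx"
def pvP (item : String) : Bool :=
  let s := PySem.Str.lower (PySem.Str.strip item)
  s == "python" || s == "pip"
def pvD (item : String) : Bool :=
  let s := PySem.Str.lower (PySem.Str.strip item)
  s == "docker"

theorem pvStepCore (a b c d : Bool) (s : String) :
    (if s == "node" || s == "npm" || s == "npx" then ((true, b, c, d) : Bool × Bool × Bool × Bool)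
     else if s == "uv" || s == "uvx" then (a, true, c, d)
     else if s == "python" || s == "pip" then (a, b, true, d)
     else if s == "docker" then (a, b, c, true)
     else (a, b, c, d))
    = (a || (s == "node" || s == "npm" || s == "npx"), b || (s == "uv" || s == "uvx"),
       c || (s == "python" || s == "pip"), d || (s == "docker")) := by
  cases hN : (s == "node" || s == "npm" || s == "npx") with
  | true =>
    simp only [Bool.or_eq_true, beq_iff_eq] at hN
    rcases hN with (h | h) | h <;> subst h <;> simp
  | false =>
    cases hU : (s == "uv" || s == "uvx") with
    | true =>
      simp only [Bool.or_eq_true, beq_iff_eq] at hU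
      rcases hU with h | h <;> subst h <;> simp_all
    | false =>
      cases hP : (s == "python" || s == "pip") with
      | true =>
        simp only [Bool.or_eq_true, beq_iff_eq] at hP
        rcases hP with h | h <;> subst h <;> simp_all
      | false =>
        cases hD : (s == "docker") with
        | true =>
          simp only [beq_iff_eq] at hD
          subst hD
          simp_all
        | false => simp

theorem pvStepB_eq (st : Bool × Bool × Bool × Bool) (x : String) :
    pvStepB st x = (st.1 || pvN x, st.2.1 || pvU x, st.2.2.1 || pvP x, st.2.2.2 || pvD x) := by
  obtain ⟨a, b, c, d⟩ := st
  exact pvStepCore a b c d (PySem.Str.lower (PySem.Str.strip x))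

theorem pvFoldB_eq (l : List String) (a b c d : Bool) :
    l.foldl pvStepB (a, b, c, d) = (a || l.any pvN, b || l.any pvU, c || l.any pvP, d || l.any pvD) := by
  induction l generalizing a b c d with
  | nil => simp
  | cons x l ih =>
    simp only [List.foldl_cons, pvStepB_eq, ih, List.any_cons]
    simp [Bool.or_assoc]

-- an item whose stripped form is empty triggers no recipe, so A's filter is irrelevant
theorem pvAnyFilter (q : String → Bool) (hq : q (PySem.Str.lower "") = false) (l : List String) :
    ((l.filter (fun item => !(PySem.Str.strip item == ""))).map
      (fun item => PySem.Str.lower (PySem.Str.strip item))).any q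
      = l.any (fun item => q (PySem.Str.lower (PySem.Str.strip item))) := by
  induction l with
  | nil => simp
  | cons x l ih =>
    by_cases h : PySem.Str.strip x = ""
    · simp only [List.filter_cons, h, beq_self_eq_true, Bool.not_true, Bool.false_eq_true,
        if_false, ih, List.any_cons, hq, Bool.false_or]
    · have hb : (!(PySem.Str.strip x == "")) = true := by
        simp only [Bool.not_eq_eq_eq_not, Bool.not_true, beq_eq_false_iff_ne, ne_eq]
        exact h
      simp only [List.filter_cons, hb, if_true, List.map_cons, List.any_cons, ih]

-- ===== VERDICT (by name: the statement is the Claim_ definition above) =====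
theorem supported_repair_recipes_spec : Claim_equal_supported_repair_recipes := by
  unfold Claim_equal_supported_repair_recipes
  intro ms _
  unfold Spec_supported_repair_recipes supported_repair_recipes supported_repair_recipes_alt
  simp only [pvFoldB_eq, Bool.false_or]
  rw [pvAnyFilter _ (by decide), pvAnyFilter _ (by decide), pvAnyFilter _ (by decide),
      pvAnyFilter _ (by decide)]
  show _ = (if ms.any pvN then _ else _) ++ (if ms.any pvU then _ else _) ++
           (if ms.any pvP then _ else _) ++ (if ms.any pvD then _ else _)
  unfold pvN pvU pvP pvD
  by_cases h1 : ms.any (fun item => (PySem.Str.lower (PySem.Str.strip item) == "node" ||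
      PySem.Str.lower (PySem.Str.strip item) == "npm" || PySem.Str.lower (PySem.Str.strip item) == "npx")) <;>
    by_cases h2 : ms.any (fun item => (PySem.Str.lower (PySem.Str.strip item) == "uv" ||
      PySem.Str.lower (PySem.Str.strip item) == "uvx")) <;>
    by_cases h3 : ms.any (fun item => (PySem.Str.lower (PySem.Str.strip item) == "python" ||
      PySem.Str.lower (PySem.Str.strip item) == "pip")) <;>
    by_cases h4 : ms.any (fun item => (PySem.Str.lower (PySem.Str.strip item) == "docker")) <;>
    simp [h1, h2, h3, h4]
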